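-- pv_equiv track=rewrite | github.com/gportella/codewars_challenges | circular_genome_assembly/genome_assembly_codewars.py | trim_circular
-- ===== SOURCE A (Python) =====
-- def trim_circular(S: str) -> str:
--     n = len(S)
--     if n == 0:
--         return S
--     pi = [0] * n
--     j = 0
--     for i in range(1, n):
--         while j > 0 and S[i] != S[j]:
--             j = pi[j - 1]
--         if S[i] == S[j]:
--             j += 1
--         pi[i] = j
--
--     border = pi[-1]
--     if 0 < border < n:
--         return S[:-border]
--     return S
-- ===== SOURCE B (Python) =====
-- def trim_circular(S: str) -> str:
--     n = len(S)
--     # largest proper border by direct slice comparison, longest first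
--     for k in range(n - 1, 0, -1):
--         if S[:k] == S[n - k:]:
--             return S[:n - k]
--     return S
-- ===== Notes on version B (the rewrite author's own statement) =====
-- stated objective: simpler
-- what changed: Replaces the KMP prefix-function table with a single downward scan that tests each candidate border length k by direct slice comparison S[:k] == S[n-k:], returning on the first (longest) match.
import Mathlib
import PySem

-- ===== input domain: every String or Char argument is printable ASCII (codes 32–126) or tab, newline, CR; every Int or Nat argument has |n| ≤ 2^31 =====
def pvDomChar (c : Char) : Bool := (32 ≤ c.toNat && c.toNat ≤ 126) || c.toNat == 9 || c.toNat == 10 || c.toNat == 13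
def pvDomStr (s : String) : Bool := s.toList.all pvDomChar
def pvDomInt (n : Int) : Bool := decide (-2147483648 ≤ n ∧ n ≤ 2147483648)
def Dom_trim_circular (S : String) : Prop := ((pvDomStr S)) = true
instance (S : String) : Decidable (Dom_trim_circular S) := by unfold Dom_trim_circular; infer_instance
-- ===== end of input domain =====

-- B replaces A's KMP prefix-function table by a direct longest-first scan for a border; objective: simpler.

-- ===== PORT A =====
-- the inner `while j > 0 and S[i] != S[j]: j = pi[j-1]`; fuel bounds the descent (j strictly
-- decreases on every actual run, so fuel = initial j is enough; fuel only makes the recursion total)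
def kmpWhile (s : List Char) (pi : List Nat) (c : Char) (fuel j : Nat) : Nat :=
  match fuel with
  | 0 => j
  | fuel + 1 =>
      if 0 < j ∧ c ≠ s.getD j ' ' then kmpWhile s pi c fuel (pi.getD (j - 1) 0) else j

-- the outer `for i in range(1, n)` loop, carrying (pi, j)
def kmpOuter (s : List Char) (pi : List Nat) (j i n : Nat) : List Nat :=
  if _h : i < n then
    let j1 := kmpWhile s pi (s.getD i ' ') j j
    let j2 := if s.getD i ' ' = s.getD j1 ' ' then j1 + 1 else j1
    kmpOuter s (pi.set i j2) j2 (i + 1) n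
  else pi
termination_by n - i

def trim_circular (S : String) : String :=
  let s := S.toList
  let n := s.length
  if n = 0 then S
  else
    let pi := kmpOuter s (List.replicate n 0) 0 1 n
    let border := pi.getD (n - 1) 0   -- pi[-1], n ≥ 1 so this is element n-1
    -- S[:-border] with 0 < border < n is exactly the first n-border characters
    if 0 < border ∧ border < n then String.ofList (s.take (n - border)) else S

-- ===== PORT B =====
-- `for k in range(n-1, 0, -1): if S[:k] == S[n-k:]: return S[:n-k]`, recursion on k
def altLoop (s : List Char) : Nat → List Char
  | 0 => s
  | k + 1 =>
      if s.take (k + 1) = s.drop (s.length - (k + 1)) then s.take (s.length - (k + 1))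
      else altLoop s k

def trim_circular_alt (S : String) : String :=
  let s := S.toList
  if s.length = 0 then S else String.ofList (altLoop s (s.length - 1))

-- ===== PRECONDITION & SPEC =====
def Spec_trim_circular (S : String) (out : String) : Prop := out = trim_circular_alt S
instance (S : String) (out : String) : Decidable (Spec_trim_circular S out) := by unfold Spec_trim_circular; infer_instance

-- ===== CLAIM (what is proved, stated in full; the proofs are below) =====
def Claim_equal_trim_circular : Prop := ∀ (S : String), Dom_trim_circular S → Spec_trim_circular S (trim_circular S)

-- ===== LEMMAS AND PROOFS =====

-- `IsB t k`: the k-prefix of t equals its k-suffix (k = 0 always qualifies)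
def IsB (t : List Char) (k : Nat) : Prop := k ≤ t.length ∧ t.take k = t.drop (t.length - k)

-- longest border ≤ k of t, by downward scan (the same scan B performs)
def lbAux (t : List Char) : Nat → Nat
  | 0 => 0
  | k + 1 => if t.take (k + 1) = t.drop (t.length - (k + 1)) then k + 1 else lbAux t k

theorem lbAux_le (t : List Char) (k : Nat) : lbAux t k ≤ k := by
  induction k with
  | zero => simp [lbAux]
  | succ k ih => unfold lbAux; split <;> omega

theorem lbAux_isB (t : List Char) (k : Nat) (hk : k < t.length) : IsB t (lbAux t k) := by
  induction k with
  | zero => exact ⟨by simp [lbAux], by simp [lbAux]⟩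
  | succ k ih =>
      unfold lbAux; split
      · exact ⟨by omega, by assumption⟩
      · exact ih (by omega)

theorem lbAux_max (t : List Char) (k j : Nat) (hB : IsB t j) (hj : j ≤ k) : j ≤ lbAux t k := by
  induction k with
  | zero => omega
  | succ k ih =>
      unfold lbAux; split
      · omega
      · rcases Nat.lt_or_ge j (k + 1) with h | h
        · exact ih (by omega)
        · exfalso
          have hjk : j = k + 1 := by omega
          subst hjk; exact (by assumption : ¬ _) hB.2

theorem lb_char (t : List Char) (k v : Nat) (hv : v ≤ k) (hk : k < t.length)
    (hB : IsB t v) (hmax : ∀ a, a ≤ k → IsB t a → a ≤ v) : lbAux t k = v :=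
  le_antisymm (hmax _ (lbAux_le t k) (lbAux_isB t k hk)) (lbAux_max t k v hB hv)

-- a border of a border is a border
theorem IsB_trans (t : List Char) (a b : Nat) (hb : IsB t b) (ha : IsB (t.take b) a) : IsB t a := by
  obtain ⟨hbl, hbe⟩ := hb
  obtain ⟨hal, hae⟩ := ha
  rw [List.length_take, Nat.min_eq_left hbl] at hal hae
  refine ⟨le_trans hal hbl, ?_⟩
  have h1 : t.take a = (t.take b).take a := by rw [List.take_take, Nat.min_eq_left hal]
  have h2 : (t.take b).drop (b - a) = (t.drop (t.length - b)).drop (b - a) := by rw [hbe]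
  rw [List.drop_drop] at h2
  have : t.length - b + (b - a) = t.length - a := by omega
  rw [this] at h2
  rw [h1, hae, h2]

-- two borders nest: the smaller is a border of the larger (as a prefix of t)
theorem IsB_nest (t : List Char) (a b : Nat) (hab : a ≤ b) (ha : IsB t a) (hb : IsB t b) :
    IsB (t.take b) a := by
  obtain ⟨hbl, hbe⟩ := hb
  obtain ⟨hal, hae⟩ := ha
  refine ⟨by rw [List.length_take]; omega, ?_⟩
  rw [List.length_take, Nat.min_eq_left hbl]
  rw [List.take_take, Nat.min_eq_left hab]
  rw [hbe, List.drop_drop]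
  have : t.length - b + (b - a) = t.length - a := by omega
  rw [this, hae]

theorem take_succ_getD (s : List Char) (m : Nat) (hm : m < s.length) :
    s.take (m + 1) = s.take m ++ [s.getD m ' '] := by
  rw [List.take_add_one, List.getElem?_eq_getElem hm]
  simp [List.getD, List.getElem?_eq_getElem hm]

-- the extension lemma: borders of s[:m+1] of positive length come from matching borders of s[:m]
theorem IsB_extend (s : List Char) (m k : Nat) (hm : m < s.length) (hk : k < m) :
    IsB (s.take (m + 1)) (k + 1) ↔ (IsB (s.take m) k ∧ s.getD m ' ' = s.getD k ' ') := by
  have hm1 : m + 1 ≤ s.length := by omega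
  have hlen1 : (s.take (m + 1)).length = m + 1 := by rw [List.length_take]; omega
  have hlenm : (s.take m).length = m := by rw [List.length_take]; omega
  have htk : (s.take (m + 1)).take (k + 1) = s.take (k + 1) := by
    rw [List.take_take]; congr 1; omega
  have hsplit : s.take (m + 1) = s.take m ++ [s.getD m ' '] := take_succ_getD s m hm
  have hdp : (s.take (m + 1)).drop (m + 1 - (k + 1)) =
      (s.take m).drop (m - k) ++ [s.getD m ' '] := by
    rw [hsplit, List.drop_append_of_le_length (by omega : m + 1 - (k + 1) ≤ (s.take m).length)]
    congr 2
    omega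
  have htk2 : s.take (k + 1) = s.take k ++ [s.getD k ' '] := take_succ_getD s k (by omega)
  have htkm : (s.take m).take k = s.take k := by rw [List.take_take]; congr 1; omega
  constructor
  · rintro ⟨_, he⟩
    rw [hlen1, htk, hdp, htk2] at he
    have := List.append_singleton_inj.mp he
    refine ⟨⟨by omega, ?_⟩, this.2.symm⟩
    rw [htkm, hlenm, this.1]
  · rintro ⟨⟨_, he⟩, hc⟩
    refine ⟨by omega, ?_⟩
    rw [hlen1, htk, hdp, htk2]
    have : m + 1 - (k + 1) = m - k := by omega
    rw [htkm, hlenm] at he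
    exact List.append_singleton_inj.mpr ⟨he, hc.symm⟩

-- proper border of the length-i prefix
def PB (s : List Char) (i k : Nat) : Prop := k < i ∧ IsB (s.take i) k

-- specification of the while loop under the prefix-function invariant on pi
theorem kmpWhile_spec (s : List Char) (pi : List Nat) (i : Nat) (_hi : 1 ≤ i) (hin : i ≤ s.length)
    (Hpi : ∀ t, t < i → pi.getD t 0 = lbAux (s.take (t + 1)) t) :
    ∀ fuel j, j ≤ fuel → PB s i j →
      PB s i (kmpWhile s pi (s.getD i ' ') fuel j) ∧
      (kmpWhile s pi (s.getD i ' ') fuel j = 0 ∨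
        s.getD (kmpWhile s pi (s.getD i ' ') fuel j) ' ' = s.getD i ' ') ∧
      (∀ k, PB s i k → s.getD k ' ' = s.getD i ' ' → k ≤ j →
        k ≤ kmpWhile s pi (s.getD i ' ') fuel j) := by
  intro fuel
  induction fuel with
  | zero =>
      intro j hj hPB
      have hj0 : j = 0 := by omega
      subst hj0
      exact ⟨hPB, Or.inl rfl, fun k _ _ hk => hk⟩
  | succ fuel ih =>
      intro j hj hPB
      unfold kmpWhile
      split
      · rename_i hcond
        obtain ⟨hjpos, hne⟩ := hcond
        have hji : j < i := hPB.1
        have hpij : pi.getD (j - 1) 0 = lbAux (s.take j) (j - 1) := by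
          have := Hpi (j - 1) (by omega)
          rwa [Nat.sub_add_cancel (by omega : 1 ≤ j)] at this
        set j' := pi.getD (j - 1) 0 with hj'
        have hj'le : j' ≤ j - 1 := by rw [hpij]; exact lbAux_le _ _
        have hBj' : IsB (s.take j) j' := by
          rw [hpij]
          exact lbAux_isB _ _ (by rw [List.length_take]; omega)
        have hPB' : PB s i j' := by
          refine ⟨by omega, IsB_trans (s.take i) j' j hPB.2 ?_⟩
          rwa [List.take_take, Nat.min_eq_left (by omega : j ≤ i)]
        obtain ⟨C1, C2, C3⟩ := ih j' (by omega) hPB'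
        refine ⟨C1, C2, fun k hk hmatch hkj => ?_⟩
        have hkne : k ≠ j := by
          intro h; subst h; exact hne hmatch.symm
        have hklt : k ≤ j - 1 := by omega
        have hkB : IsB (s.take j) k := by
          have := IsB_nest (s.take i) k j (by omega) hk.2 hPB.2
          rwa [List.take_take, Nat.min_eq_left (by omega : j ≤ i)] at this
        have : k ≤ j' := by rw [hpij]; exact lbAux_max _ _ _ hkB hklt
        exact C3 k hk hmatch this
      · rename_i h
        rw [not_and_or, not_not, Nat.not_lt, Nat.le_zero] at h
        refine ⟨hPB, ?_, fun k _ _ hk => hk⟩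
        rcases h with h | h
        · exact Or.inl h
        · exact Or.inr h.symm

-- one outer-loop step computes the longest proper border of the next prefix
theorem kmp_step (s : List Char) (pi : List Nat) (i : Nat) (hi : 1 ≤ i) (hin : i < s.length)
    (Hpi : ∀ t, t < i → pi.getD t 0 = lbAux (s.take (t + 1)) t) :
    (let j0 := lbAux (s.take i) (i - 1)
     let j1 := kmpWhile s pi (s.getD i ' ') j0 j0
     if s.getD i ' ' = s.getD j1 ' ' then j1 + 1 else j1) = lbAux (s.take (i + 1)) i := by
  simp only
  set j0 := lbAux (s.take i) (i - 1) with hj0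
  have hlti : (s.take i).length = i := by rw [List.length_take]; omega
  have hj0le : j0 ≤ i - 1 := lbAux_le _ _
  have hPB0 : PB s i j0 := ⟨by omega, lbAux_isB _ _ (by rw [hlti]; omega)⟩
  obtain ⟨C1, C2, C3⟩ := kmpWhile_spec s pi i hi (by omega) Hpi j0 j0 le_rfl hPB0
  set j1 := kmpWhile s pi (s.getD i ' ') j0 j0 with hj1
  have hmax0 : ∀ k, PB s i k → s.getD k ' ' = s.getD i ' ' → k ≤ j1 := by
    intro k hk hm
    have hki := hk.1
    refine C3 k hk hm ?_
    exact lbAux_max _ _ _ hk.2 (by omega)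
  have hlen1 : i < (s.take (i + 1)).length := by rw [List.length_take]; omega
  split
  · rename_i hmatch
    refine (lb_char _ i (j1 + 1) (by have := C1.1; omega) hlen1 ?_ ?_).symm
    · exact (IsB_extend s i j1 hin C1.1).mpr ⟨C1.2, hmatch⟩
    · intro a ha haB
      match a with
      | 0 => omega
      | k + 1 =>
          obtain ⟨hkB, hkc⟩ := (IsB_extend s i k hin (by omega)).mp haB
          have := hmax0 k ⟨by omega, hkB⟩ hkc.symm
          omega
  · rename_i hmatch
    have hj10 : j1 = 0 := by
      rcases C2 with h | h
      · exact h
      · exact absurd h.symm hmatch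
    rw [hj10]
    refine (lb_char _ i 0 (by omega) hlen1 ⟨Nat.zero_le _, by simp⟩ ?_).symm
    intro a ha haB
    match a with
    | 0 => omega
    | k + 1 =>
        obtain ⟨hkB, hkc⟩ := (IsB_extend s i k hin (by omega)).mp haB
        have hk0 : k = 0 := by have := hmax0 k ⟨by omega, hkB⟩ hkc.symm; omega
        subst hk0
        rw [hj10] at hmatch
        exact absurd hkc hmatch

theorem kmpOuter_spec (s : List Char) :
    ∀ gas i pi j, gas = s.length - i → 1 ≤ i → i ≤ s.length → pi.length = s.length →
    (∀ t, t < i → pi.getD t 0 = lbAux (s.take (t + 1)) t) →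
    j = pi.getD (i - 1) 0 →
    ∀ t, t < s.length → (kmpOuter s pi j i s.length).getD t 0 = lbAux (s.take (t + 1)) t := by
  intro gas
  induction gas with
  | zero =>
      intro i pi j hgas hi1 hin _ Hpi _ t ht
      have : ¬ i < s.length := by omega
      rw [kmpOuter, dif_neg this]
      exact Hpi t (by omega)
  | succ gas ih =>
      intro i pi j hgas hi1 hin hlen Hpi hj t ht
      by_cases hlt : i < s.length
      · rw [kmpOuter, dif_pos hlt]
        simp only
        have hj0 : j = lbAux (s.take i) (i - 1) := by
          rw [hj]
          have := Hpi (i - 1) (by omega)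
          rwa [Nat.sub_add_cancel (by omega : 1 ≤ i)] at this
        set j2 := if s.getD i ' ' = s.getD (kmpWhile s pi (s.getD i ' ') j j) ' '
            then kmpWhile s pi (s.getD i ' ') j j + 1 else kmpWhile s pi (s.getD i ' ') j j with hj2
        have hstep : j2 = lbAux (s.take (i + 1)) i := by
          rw [hj2, hj0]
          exact kmp_step s pi i hi1 hlt Hpi
        have hset : ∀ u, u < i + 1 → (pi.set i j2).getD u 0 = lbAux (s.take (u + 1)) u := by
          intro u hu
          rcases Nat.lt_or_ge u i with hui | hui
          · rw [List.getD_eq_getElem?_getD, List.getElem?_set_ne (by omega),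
              ← List.getD_eq_getElem?_getD]
            exact Hpi u hui
          · have hui' : u = i := by omega
            subst hui'
            rw [List.getD_eq_getElem?_getD, List.getElem?_set_self (by omega),
              Option.getD_some]
            exact hstep
        refine ih (i + 1) (pi.set i j2) j2 (by omega) (by omega) (by omega)
          (by rw [List.length_set]; exact hlen) hset ?_ t ht
        rw [List.getD_eq_getElem?_getD, Nat.add_sub_cancel,
          List.getElem?_set_self (by omega), Option.getD_some]
      · rw [kmpOuter, dif_neg hlt]
        exact Hpi t (by omega)

-- B's scan returns `s` when there is no positive border, else trims the longest one
theorem altLoop_eq (s : List Char) (k : Nat) :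
    altLoop s k = if 0 < lbAux s k then s.take (s.length - lbAux s k) else s := by
  induction k with
  | zero => simp [altLoop, lbAux]
  | succ k ih => unfold altLoop lbAux; split <;> simp_all

-- ===== VERDICT (by name: the statement is the Claim_ definition above) =====
theorem trim_circular_spec : Claim_equal_trim_circular := by
  intro S _
  unfold Spec_trim_circular trim_circular trim_circular_alt
  simp only
  set s := S.toList with hs
  by_cases h0 : s.length = 0
  · rw [if_pos h0, if_pos h0]
  · rw [if_neg h0, if_neg h0]
    have hn : 1 ≤ s.length := by omega
    have Hfin := kmpOuter_spec s (s.length - 1) 1 (List.replicate s.length 0) 0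
      (by omega) le_rfl hn (List.length_replicate)
      (by
        intro u hu
        have hu0 : u = 0 := by omega
        subst hu0
        simp [lbAux])
      (by simp)
      (s.length - 1) (by omega)
    rw [Nat.sub_add_cancel hn, List.take_length] at Hfin
    rw [Hfin]
    have hble : lbAux s (s.length - 1) ≤ s.length - 1 := lbAux_le _ _
    rw [altLoop_eq]
    by_cases hpos : 0 < lbAux s (s.length - 1)
    · rw [if_pos ⟨hpos, by omega⟩, if_pos hpos]
    · rw [if_neg (by omega), if_neg hpos, hs, String.ofList_toList]
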